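-- pv_equiv track=rewrite | github.com/shrivdar/lumi-mvp | backend/benchmarks/strategy_memory.py | _summarize_reasoning
-- ===== SOURCE A (Python) =====
-- def _summarize_reasoning(text: str, max_length: int = 300) -> str:
--     """Extract first meaningful paragraph from reasoning text."""
--     if not text:
--         return ""
--     # Skip markdown headers and blank lines
--     lines = text.strip().split("\n")
--     paragraphs: list[str] = []
--     current: list[str] = []
--     for line in lines:
--         stripped = line.strip()
--         if not stripped:
--             if current:
--                 paragraphs.append(" ".join(current))
--                 current = []
--         elif stripped.startswith("#"):
--             if current:
--                 paragraphs.append(" ".join(current))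
--                 current = []
--         else:
--             current.append(stripped)
--     if current:
--         paragraphs.append(" ".join(current))
--
--     # Return first non-trivial paragraph
--     for p in paragraphs:
--         if len(p) > 20:
--             return p[:max_length]
--     return text[:max_length]
-- ===== SOURCE B (Python) =====
-- def _summarize_reasoning(text: str, max_length: int = 300) -> str:
--     """Extract first meaningful paragraph from reasoning text."""
--     if not text:
--         return ""
--     # Run-based scan with early exit: strip all lines up front, then jump
--     # over runs of content lines (non-blank, non-header); no paragraph list.
--     lines = [line.strip() for line in text.strip().split("\n")]
--     i, n = 0, len(lines)
--     while i < n: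
--         if lines[i] and not lines[i].startswith("#"):
--             j = i
--             while j < n and lines[j] and not lines[j].startswith("#"):
--                 j += 1
--             p = " ".join(lines[i:j])
--             if len(p) > 20:
--                 return p[:max_length]
--             i = j
--         else:
--             i += 1
--     return text[:max_length]
-- ===== Notes on version B (the rewrite author's own statement) =====
-- stated objective: alternative
-- what changed: Replaces A's accumulate-and-flush fold that builds the full paragraph list and then scans it, by a run-based scan over pre-stripped lines that joins each maximal run of content lines and returns the first one longer than 20 characters immediately (early exit, no paragraph list).
import Mathlib
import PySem

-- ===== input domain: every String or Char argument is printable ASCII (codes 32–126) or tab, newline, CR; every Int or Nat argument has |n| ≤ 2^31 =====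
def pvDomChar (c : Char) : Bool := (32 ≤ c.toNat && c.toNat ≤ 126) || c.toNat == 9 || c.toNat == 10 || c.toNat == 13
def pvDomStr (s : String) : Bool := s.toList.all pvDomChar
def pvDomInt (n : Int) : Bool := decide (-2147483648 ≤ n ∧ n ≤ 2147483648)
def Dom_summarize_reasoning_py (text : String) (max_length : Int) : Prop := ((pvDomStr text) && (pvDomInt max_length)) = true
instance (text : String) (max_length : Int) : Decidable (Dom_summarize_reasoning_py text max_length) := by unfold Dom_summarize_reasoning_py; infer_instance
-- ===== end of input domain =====

-- B replaces A's accumulate-and-flush paragraph builder by a run-based scan with early exit (alternative decomposition, same cost).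

-- ===== PORT A =====
-- A's loop body: strip the line; blank or '#'-header flushes `current`, otherwise append.
def pvStepA (pc : List (List Char) × List (List Char)) (line : List Char) :
    List (List Char) × List (List Char) :=
  let stripped := PySem.Chars.strip line
  if stripped.isEmpty then
    (if pc.2.isEmpty then pc else (pc.1 ++ [PySem.Chars.join [' '] pc.2], ([] : List (List Char))))
  else if PySem.Chars.startswith stripped ['#'] then
    (if pc.2.isEmpty then pc else (pc.1 ++ [PySem.Chars.join [' '] pc.2], ([] : List (List Char))))
  else (pc.1, pc.2 ++ [stripped])

def summarize_reasoning_py (text : String) (max_length : Int) : String :=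
  if text = "" then ""
  else
    let lines := PySem.Chars.splitOn (PySem.Chars.strip text.toList) ['\n']
    let pc := lines.foldl pvStepA ([], [])
    let paragraphs := if pc.2.isEmpty then pc.1 else pc.1 ++ [PySem.Chars.join [' '] pc.2]
    match paragraphs.find? (fun p => 20 < p.length) with
    | some p => String.ofList (PySem.List.slice p none (some max_length))
    | none => String.ofList (PySem.List.slice text.toList none (some max_length))

-- ===== PORT B =====
-- a (pre-stripped) line is "content" iff non-blank and not a '#' header
def pvContent (l : List Char) : Bool := !l.isEmpty && !PySem.Chars.startswith l ['#']

-- B's inner while: split off the leading run of content lines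
def pvSplitRun : List (List Char) → List (List Char) × List (List Char)
  | [] => ([], [])
  | l :: t => if pvContent l then ((pvSplitRun t).1.cons l, (pvSplitRun t).2) else ([], l :: t)

theorem pvSplitRun_snd_len (xs : List (List Char)) : (pvSplitRun xs).2.length ≤ xs.length := by
  induction xs with
  | nil => simp [pvSplitRun]
  | cons l t ih => by_cases h : pvContent l <;> simp [pvSplitRun, h] <;> omega

-- B's outer while over the remaining lines
def pvBLoop (text : String) (max_length : Int) : List (List Char) → String
  | [] => String.ofList (PySem.List.slice text.toList none (some max_length))
  | l :: rest =>
    if h : pvContent l = true then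
      let p := PySem.Chars.join [' '] (pvSplitRun (l :: rest)).1
      if 20 < p.length then String.ofList (PySem.List.slice p none (some max_length))
      else pvBLoop text max_length (pvSplitRun (l :: rest)).2
    else pvBLoop text max_length rest
termination_by s => s.length
decreasing_by
  · simp only [pvSplitRun, h, if_pos]
    have := pvSplitRun_snd_len rest
    simp only [List.length_cons]; omega
  · simp

def summarize_reasoning_py_alt (text : String) (max_length : Int) : String :=
  if text = "" then ""
  else
    pvBLoop text max_length
      ((PySem.Chars.splitOn (PySem.Chars.strip text.toList) ['\n']).map PySem.Chars.strip)

-- ===== PRECONDITION & SPEC =====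
def Spec_summarize_reasoning_py (text : String) (max_length : Int) (out : String) : Prop := out = summarize_reasoning_py_alt text max_length
instance (text : String) (max_length : Int) (out : String) : Decidable (Spec_summarize_reasoning_py text max_length out) := by unfold Spec_summarize_reasoning_py; infer_instance

-- ===== CLAIM (what is proved, stated in full; the proofs are below) =====
def Claim_equal_summarize_reasoning_py : Prop := ∀ (text : String) (max_length : Int), Dom_summarize_reasoning_py text max_length → Spec_summarize_reasoning_py text max_length (summarize_reasoning_py text max_length)

-- ===== LEMMAS AND PROOFS =====

-- simplified step over pre-stripped lines
def pvStepS (pc : List (List Char) × List (List Char)) (s : List Char) :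
    List (List Char) × List (List Char) :=
  if pvContent s then (pc.1, pc.2 ++ [s])
  else if pc.2.isEmpty then pc else (pc.1 ++ [PySem.Chars.join [' '] pc.2], [])

theorem pvStepA_eq (pc : List (List Char) × List (List Char)) (line : List Char) :
    pvStepA pc line = pvStepS pc (PySem.Chars.strip line) := by
  unfold pvStepA pvStepS pvContent
  split_ifs with h1 h2 h3 <;> simp_all

-- flush the final current paragraph
def pvFinish (pc : List (List Char) × List (List Char)) : List (List Char) :=
  if pc.2.isEmpty then pc.1 else pc.1 ++ [PySem.Chars.join [' '] pc.2]

-- accumulated paragraphs factor out of the fold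
theorem pvFold_prefix (s : List (List Char)) (ps cur : List (List Char)) :
    s.foldl pvStepS (ps, cur) =
      (ps ++ (s.foldl pvStepS ([], cur)).1, (s.foldl pvStepS ([], cur)).2) := by
  induction s generalizing ps cur with
  | nil => simp
  | cons l t ih =>
    simp only [List.foldl_cons]
    by_cases h : pvContent l
    · rw [show pvStepS (ps, cur) l = (ps, cur ++ [l]) by simp [pvStepS, h],
        show pvStepS (([] : List (List Char)), cur) l = ([], cur ++ [l]) by simp [pvStepS, h]]
      exact ih ps (cur ++ [l])
    · by_cases hc : cur.isEmpty
      · rw [show pvStepS (ps, cur) l = (ps, cur) by simp [pvStepS, h, hc],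
          show pvStepS (([] : List (List Char)), cur) l = ([], cur) by simp [pvStepS, h, hc]]
        exact ih ps cur
      · rw [show pvStepS (ps, cur) l = (ps ++ [PySem.Chars.join [' '] cur], []) by simp [pvStepS, h, hc],
          show pvStepS (([] : List (List Char)), cur) l = ([PySem.Chars.join [' '] cur], []) by simp [pvStepS, h, hc]]
        rw [ih (ps ++ [PySem.Chars.join [' '] cur]) [], ih [PySem.Chars.join [' '] cur] []]
        simp

def pvParasFrom (cur : List (List Char)) (s : List (List Char)) : List (List Char) :=
  pvFinish (s.foldl pvStepS ([], cur))

theorem pvParasFrom_prefix (s : List (List Char)) (ps cur : List (List Char)) :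
    pvFinish (s.foldl pvStepS (ps, cur)) = ps ++ pvParasFrom cur s := by
  rw [pvFold_prefix]
  unfold pvParasFrom pvFinish
  by_cases h : (s.foldl pvStepS ([], cur)).2.isEmpty <;> simp [h]

-- a nonempty current paragraph closes at the end of the current run
theorem pvParasFrom_run (t : List (List Char)) (cur : List (List Char)) (hcur : ¬ cur.isEmpty) :
    pvParasFrom cur t =
      PySem.Chars.join [' '] (cur ++ t.takeWhile pvContent) :: pvParasFrom [] (t.dropWhile pvContent) := by
  induction t generalizing cur with
  | nil => simp [pvParasFrom, pvFinish, hcur]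
  | cons x xs ih =>
    by_cases h : pvContent x
    · have h1 : pvParasFrom cur (x :: xs) = pvParasFrom (cur ++ [x]) xs := by
        unfold pvParasFrom
        simp only [List.foldl_cons]
        rw [show pvStepS (([] : List (List Char)), cur) x = ([], cur ++ [x]) by simp [pvStepS, h]]
      rw [h1, ih (cur ++ [x]) (by simp)]
      simp [h, List.takeWhile_cons, List.dropWhile_cons]
    · have h1 : pvParasFrom cur (x :: xs) = [PySem.Chars.join [' '] cur] ++ pvParasFrom [] xs := by
        unfold pvParasFrom
        simp only [List.foldl_cons]
        rw [show pvStepS (([] : List (List Char)), cur) x = ([PySem.Chars.join [' '] cur], []) by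
          simp [pvStepS, h, hcur]]
        exact pvParasFrom_prefix xs [PySem.Chars.join [' '] cur] []
      have h2 : pvParasFrom ([] : List (List Char)) (x :: xs) = pvParasFrom [] xs := by
        unfold pvParasFrom
        simp only [List.foldl_cons]
        rw [show pvStepS (([] : List (List Char)), ([] : List (List Char))) x = ([], []) by
          simp [pvStepS, h]]
      rw [h1, List.takeWhile_cons_of_neg (by simpa using h),
        List.dropWhile_cons_of_neg (by simpa using h), h2]
      simp

-- selecting the first long paragraph from A's list
def pvPick (text : String) (max_length : Int) (paras : List (List Char)) : String :=
  match paras.find? (fun p => 20 < p.length) with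
  | some p => String.ofList (PySem.List.slice p none (some max_length))
  | none => String.ofList (PySem.List.slice text.toList none (some max_length))

theorem pvPick_cons_pos (text : String) (max_length : Int) (p : List Char)
    (rest : List (List Char)) (h : 20 < p.length) :
    pvPick text max_length (p :: rest) = String.ofList (PySem.List.slice p none (some max_length)) := by
  simp [pvPick, List.find?_cons_of_pos, h]

theorem pvPick_cons_neg (text : String) (max_length : Int) (p : List Char)
    (rest : List (List Char)) (h : ¬ 20 < p.length) :
    pvPick text max_length (p :: rest) = pvPick text max_length rest := by
  unfold pvPick
  rw [List.find?_cons_of_neg (by simpa using h)]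

theorem pvMain (text : String) (max_length : Int) :
    ∀ (n : ℕ) (s : List (List Char)), s.length ≤ n →
      pvPick text max_length (pvParasFrom [] s) = pvBLoop text max_length s := by
  intro n
  induction n with
  | zero =>
    intro s hs
    have : s = [] := List.eq_nil_of_length_eq_zero (Nat.le_zero.mp hs)
    subst this
    simp [pvParasFrom, pvFinish, pvPick, pvBLoop]
  | succ n ih =>
    intro s hs
    match s with
    | [] => simp [pvParasFrom, pvFinish, pvPick, pvBLoop]
    | l :: t =>
      by_cases h : pvContent l
      · have hrun : pvParasFrom [] (l :: t) =
            PySem.Chars.join [' '] (l :: t.takeWhile pvContent) :: pvParasFrom [] (t.dropWhile pvContent) := by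
          have h1 : pvParasFrom ([] : List (List Char)) (l :: t) = pvParasFrom [l] t := by
            unfold pvParasFrom
            simp only [List.foldl_cons]
            rw [show pvStepS (([] : List (List Char)), ([] : List (List Char))) l = ([], [l]) by
              simp [pvStepS, h]]
          rw [h1, pvParasFrom_run t [l] (by simp)]
          simp
        have hsplit : pvSplitRun (l :: t) = (l :: t.takeWhile pvContent, t.dropWhile pvContent) := by
          have : ∀ (xs : List (List Char)), pvSplitRun xs = (xs.takeWhile pvContent, xs.dropWhile pvContent) := by
            intro xs
            induction xs with
            | nil => simp [pvSplitRun]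
            | cons a b ihb =>
              by_cases ha : pvContent a <;>
                simp [pvSplitRun, ha, List.takeWhile_cons, List.dropWhile_cons, ihb]
          rw [this]
          simp [List.takeWhile_cons, List.dropWhile_cons, h]
        have hB : pvBLoop text max_length (l :: t) =
            (if 20 < (PySem.Chars.join [' '] (l :: t.takeWhile pvContent)).length
             then String.ofList (PySem.List.slice (PySem.Chars.join [' '] (l :: t.takeWhile pvContent)) none (some max_length))
             else pvBLoop text max_length (t.dropWhile pvContent)) := by
          rw [pvBLoop]; simp [h, hsplit]
        rw [hrun, hB]
        by_cases hbig : 20 < (PySem.Chars.join [' '] (l :: t.takeWhile pvContent)).length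
        · rw [if_pos hbig, pvPick_cons_pos _ _ _ _ hbig]
        · rw [if_neg hbig, pvPick_cons_neg _ _ _ _ hbig]
          have hlen : (t.dropWhile pvContent).length ≤ n := by
            have := List.length_dropWhile_le (p := pvContent) t
            simp at hs; omega
          exact ih (t.dropWhile pvContent) hlen
      · have h2 : pvParasFrom ([] : List (List Char)) (l :: t) = pvParasFrom [] t := by
          unfold pvParasFrom
          simp only [List.foldl_cons]
          rw [show pvStepS (([] : List (List Char)), ([] : List (List Char))) l = ([], []) by
            simp [pvStepS, h]]
        rw [h2, pvBLoop]
        simp only [h, dite_false]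
        exact ih t (by simp at hs; omega)

theorem pvFoldA_eq (lines : List (List Char)) (pc : List (List Char) × List (List Char)) :
    lines.foldl pvStepA pc = (lines.map PySem.Chars.strip).foldl pvStepS pc := by
  induction lines generalizing pc with
  | nil => rfl
  | cons l t ih => simp only [List.foldl_cons, List.map_cons, pvStepA_eq]; exact ih _

-- ===== VERDICT (by name: the statement is the Claim_ definition above) =====
theorem summarize_reasoning_py_spec : Claim_equal_summarize_reasoning_py := by
  intro text max_length _
  unfold Spec_summarize_reasoning_py summarize_reasoning_py summarize_reasoning_py_alt
  by_cases hempty : text = ""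
  · simp [hempty]
  · simp only [hempty, if_false]
    set lines := PySem.Chars.splitOn (PySem.Chars.strip text.toList) ['\n'] with hveq
    have hfold := pvFoldA_eq lines ([], [])
    have := pvMain text max_length (lines.map PySem.Chars.strip).length
      (lines.map PySem.Chars.strip) (le_refl _)
    rw [← this]
    unfold pvPick pvParasFrom pvFinish
    rw [hfold]
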